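-- pv_equiv track=rewrite | github.com/docxology/MetaInformAnt | src/metainformant/longread/assembly/consensus.py | _quick_similarity
-- ===== SOURCE A (Python) =====
-- def _quick_similarity(seq1: str, seq2: str) -> int:
--     """Quick similarity estimate using shared k-mers."""
--     k = 7
--     if len(seq1) < k or len(seq2) < k:
--         return 0
--
--     kmers1 = set()
--     for i in range(len(seq1) - k + 1):
--         kmers1.add(seq1[i : i + k])
--
--     shared = 0
--     for i in range(len(seq2) - k + 1):
--         if seq2[i : i + k] in kmers1:
--             shared += 1
--
--     return shared
-- ===== SOURCE B (Python) =====
-- def _quick_similarity(seq1: str, seq2: str) -> int: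
--     """Quick similarity estimate using shared k-mers."""
--     k = 7
--     if len(seq1) < k or len(seq2) < k:
--         return 0
--
--     ws1 = sorted(seq1[i : i + k] for i in range(len(seq1) - k + 1))
--     ws2 = sorted(seq2[i : i + k] for i in range(len(seq2) - k + 1))
--
--     i = 0
--     shared = 0
--     for w in ws2:
--         while i < len(ws1) and ws1[i] < w:
--             i += 1
--         if i < len(ws1) and ws1[i] == w:
--             shared += 1
--     return shared
-- ===== Notes on version B (the rewrite author's own statement) =====
-- stated objective: alternative
-- what changed: B replaces A's hash-set membership scan by a sort-merge: it sorts the k-mer windows of both sequences and counts matches with a single forward two-pointer sweep over the two sorted lists (no set, no per-window hash lookup).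
import Mathlib
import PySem

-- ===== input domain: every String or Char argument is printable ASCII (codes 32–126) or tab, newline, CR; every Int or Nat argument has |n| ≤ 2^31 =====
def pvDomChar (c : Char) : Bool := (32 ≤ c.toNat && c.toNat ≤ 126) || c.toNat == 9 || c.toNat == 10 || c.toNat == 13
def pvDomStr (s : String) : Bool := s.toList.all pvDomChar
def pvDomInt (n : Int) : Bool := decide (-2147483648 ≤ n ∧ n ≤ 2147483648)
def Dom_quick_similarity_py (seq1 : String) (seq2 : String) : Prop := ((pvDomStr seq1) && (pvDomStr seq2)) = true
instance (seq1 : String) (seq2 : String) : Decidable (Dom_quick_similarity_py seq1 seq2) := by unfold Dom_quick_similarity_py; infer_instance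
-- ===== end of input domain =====

-- B replaces A's hash-set membership scan by a sort-merge: it sorts both window lists and
-- counts matches with a forward two-pointer sweep (alternative algorithm, no speed claim).


-- ===== PORT A =====
def quick_similarity_py (seq1 : String) (seq2 : String) : Int :=
  if PySem.Str.len seq1 < 7 || PySem.Str.len seq2 < 7 then 0
  else
    let kmers1 : PySem.Set String :=
      (PySem.List.pyRange 0 (PySem.Str.len seq1 - 7 + 1) 1).foldl
        (fun s i => PySem.Set.add s (PySem.Str.slice seq1 (some i) (some (i + 7)))) PySem.Set.empty
    (PySem.List.pyRange 0 (PySem.Str.len seq2 - 7 + 1) 1).foldl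
      (fun shared i =>
        if PySem.Set.contains kmers1 (PySem.Str.slice seq2 (some i) (some (i + 7))) then shared + 1
        else shared) 0

-- ===== PORT B =====
-- the merge sweep: 'for w in ws2' with the forward index i into ws1 represented by the
-- remaining suffix of ws1 (the inner 'while ws1[i] < w: i += 1' is the dropWhile)
def pvSweep : List String → List String → Int → Int
  | _, [], shared => shared
  | ws1, w :: rest, shared =>
      let ws1' := ws1.dropWhile (fun x => decide (x < w))
      pvSweep ws1' rest (if ws1'.head? = some w then shared + 1 else shared)

def quick_similarity_py_alt (seq1 : String) (seq2 : String) : Int :=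
  if PySem.Str.len seq1 < 7 || PySem.Str.len seq2 < 7 then 0
  else
    let ws1 :=
      PySem.List.sorted
        ((PySem.List.pyRange 0 (PySem.Str.len seq1 - 7 + 1) 1).map
          (fun i => PySem.Str.slice seq1 (some i) (some (i + 7)))) (fun x => x) false
    let ws2 :=
      PySem.List.sorted
        ((PySem.List.pyRange 0 (PySem.Str.len seq2 - 7 + 1) 1).map
          (fun i => PySem.Str.slice seq2 (some i) (some (i + 7)))) (fun x => x) false
    pvSweep ws1 ws2 0

-- ===== PRECONDITION & SPEC =====
def Spec_quick_similarity_py (seq1 : String) (seq2 : String) (out : Int) : Prop := out = quick_similarity_py_alt seq1 seq2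
instance (seq1 : String) (seq2 : String) (out : Int) : Decidable (Spec_quick_similarity_py seq1 seq2 out) := by unfold Spec_quick_similarity_py; infer_instance

-- ===== CLAIM =====
def Claim_equal_quick_similarity_py : Prop := ∀ (seq1 : String) (seq2 : String), Dom_quick_similarity_py seq1 seq2 → Spec_quick_similarity_py seq1 seq2 (quick_similarity_py seq1 seq2)

-- ===== LEMMAS AND PROOFS =====

-- elements ≥ w are untouched by dropping the (< w)-prefix
theorem pvMemDrop (w v : String) (hle : w ≤ v) (ws1 : List String) :
    v ∈ ws1.dropWhile (fun x => decide (x < w)) ↔ v ∈ ws1 := by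
  constructor
  · exact fun h => (List.dropWhile_sublist _).mem h
  · intro h
    rw [← List.takeWhile_append_dropWhile (p := fun x => decide (x < w)) (l := ws1),
        List.mem_append] at h
    rcases h with h | h
    · have hlt := of_decide_eq_true (List.mem_takeWhile_imp (p := fun x => decide (x < w)) h)
      exact absurd hlt (not_lt.mpr hle)
    · exact h

-- on a sorted ws1, 'ws1[i] == w' after the advance is exactly membership of w in ws1
theorem pvHeadDrop (w : String) (ws1 : List String) (hs : ws1.Pairwise (· ≤ ·)) :
    ((ws1.dropWhile (fun x => decide (x < w))).head? = some w) ↔ w ∈ ws1 := by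
  constructor
  · intro h
    exact (List.dropWhile_sublist _).mem (List.mem_of_mem_head? (h ▸ Option.mem_def.mpr rfl))
  · intro h
    have hm : w ∈ ws1.dropWhile (fun x => decide (x < w)) := (pvMemDrop w w le_rfl ws1).mpr h
    have hne : ws1.dropWhile (fun x => decide (x < w)) ≠ [] := by
      intro he; rw [he] at hm; exact absurd hm (List.not_mem_nil)
    obtain ⟨a, t, hd⟩ := List.exists_cons_of_ne_nil hne
    have hna : (decide (a < w)) = false := by
      have hnot := List.head_dropWhile_not (fun x => decide (x < w)) hne
      have e1 : (ws1.dropWhile (fun x => decide (x < w))).head? = some a := by rw [hd]; rfl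
      have e2 := List.head?_eq_some_head hne
      rw [e1] at e2
      rwa [(Option.some.inj e2).symm] at hnot
    have hwa : w ≤ a := not_lt.mp (of_decide_eq_false hna)
    have hsd : (ws1.dropWhile (fun x => decide (x < w))).Pairwise (· ≤ ·) :=
      List.Pairwise.sublist (List.dropWhile_sublist _) hs
    rw [hd] at hm hsd
    have haw : a = w := by
      rcases List.mem_cons.mp hm with h' | h'
      · exact h'.symm
      · exact le_antisymm ((List.pairwise_cons.mp hsd).1 w h') hwa
    rw [hd, haw]
    rfl

-- the sweep over two sorted lists counts the windows of ws2 that occur in ws1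
theorem pvSweepEq : ∀ (ws2 ws1 : List String) (s : Int),
    ws1.Pairwise (· ≤ ·) → ws2.Pairwise (· ≤ ·) →
    pvSweep ws1 ws2 s = s + (ws2.countP (fun w => decide (w ∈ ws1)) : Int) := by
  intro ws2
  induction ws2 with
  | nil => intro ws1 s _ _; simp [pvSweep]
  | cons w rest ih =>
    intro ws1 s h1 h2
    have h2' := List.pairwise_cons.mp h2
    have hd1 : (ws1.dropWhile (fun x => decide (x < w))).Pairwise (· ≤ ·) :=
      List.Pairwise.sublist (List.dropWhile_sublist _) h1
    have hcnt : rest.countP (fun v => decide (v ∈ ws1.dropWhile (fun x => decide (x < w))))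
        = rest.countP (fun v => decide (v ∈ ws1)) := by
      apply List.countP_congr
      intro v hv
      simp only [decide_eq_true_eq]
      exact pvMemDrop w v (h2'.1 v hv) ws1
    rw [pvSweep, ih _ _ hd1 h2'.2, hcnt, List.countP_cons]
    by_cases hmem : w ∈ ws1
    · rw [if_pos ((pvHeadDrop w ws1 h1).mpr hmem), decide_eq_true hmem]
      push_cast
      rw [if_pos (rfl : true = true)]
      ring
    · rw [if_neg (fun h => hmem ((pvHeadDrop w ws1 h1).mp h)), decide_eq_false hmem]
      simp

-- ===== VERDICT =====
theorem quick_similarity_py_spec : Claim_equal_quick_similarity_py := by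
  intro seq1 seq2 _
  unfold Spec_quick_similarity_py quick_similarity_py quick_similarity_py_alt
  split
  · rfl
  · rw [← PySem.Set.update_map_eq_foldl_add
          (f := fun i => PySem.Str.slice seq1 (some i) (some (i + 7))) (s := PySem.Set.empty),
        PySem.Set.update_empty,
        ← List.foldl_map (f := fun i => PySem.Str.slice seq2 (some i) (some (i + 7)))
          (g := fun (shared : Int) w =>
            if PySem.Set.contains (PySem.Set.ofList
              ((PySem.List.pyRange 0 (PySem.Str.len seq1 - 7 + 1) 1).map
                (fun i => PySem.Str.slice seq1 (some i) (some (i + 7))))) w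
            then shared + 1 else shared),
        PySem.List.foldl_count_if]
    show _ = pvSweep
      (PySem.List.sorted (κ := String)
        ((PySem.List.pyRange 0 (PySem.Str.len seq1 - 7 + 1) 1).map
          (fun i => PySem.Str.slice seq1 (some i) (some (i + 7)))) (fun x => x) false)
      (PySem.List.sorted (κ := String)
        ((PySem.List.pyRange 0 (PySem.Str.len seq2 - 7 + 1) 1).map
          (fun i => PySem.Str.slice seq2 (some i) (some (i + 7)))) (fun x => x) false) 0
    rw [pvSweepEq _ _ 0 (PySem.List.sorted_pairwise _ _) (PySem.List.sorted_pairwise _ _)]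
    congr 1
    rw [Nat.cast_inj,
        List.Perm.countP_eq _ (PySem.List.sorted_perm
          ((PySem.List.pyRange 0 (PySem.Str.len seq2 - 7 + 1) 1).map
            (fun i => PySem.Str.slice seq2 (some i) (some (i + 7))))
          (fun x : String => x) false)]
    apply List.countP_congr
    intro w _
    simp [PySem.List.mem_sorted, PySem.Set.mem_ofList]
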